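-- pv_equiv track=rewrite | github.com/Programming-With-Chris/GenFic | src/clean.py | stories_to_word_array
-- ===== SOURCE A (Python) =====
-- def stories_to_word_array(story_array):
--     word_array = []
--     for story in story_array:
--         story = story.replace('.', ' . ')
--         # story = story.replace('(', ' ( ')
--         # story = story.replace(')', ' ) ')
--         story = story.replace(',', ' , ')
--         story = story.replace('!', ' ! ')
--         story = story.replace('"', ' " ')
--         story = story.replace('\'', ' \' ')
--         split_story = story.split()
--         for word in split_story:
--             word_array.append(word)
--     return word_array
-- ===== SOURCE B (Python) =====
-- def stories_to_word_array(story_array):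
--     result = []
--     punct = ".,!\"'"
--     for story in story_array:
--         buf = []
--         for ch in story:
--             if ch in punct:
--                 if buf:
--                     result.append(''.join(buf))
--                     buf = []
--                 result.append(ch)
--             elif ch.isspace():
--                 if buf:
--                     result.append(''.join(buf))
--                     buf = []
--             else:
--                 buf.append(ch)
--         if buf:
--             result.append(''.join(buf))
--     return result
-- ===== Notes on version B (the rewrite author's own statement) =====
-- stated objective: alternative
-- what changed: Replaced the five full-string replace passes plus a whitespace split per story by a single character-by-character scan with a word buffer that emits punctuation tokens and whitespace-delimited words directly, building no intermediate expanded strings.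
import Mathlib
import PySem

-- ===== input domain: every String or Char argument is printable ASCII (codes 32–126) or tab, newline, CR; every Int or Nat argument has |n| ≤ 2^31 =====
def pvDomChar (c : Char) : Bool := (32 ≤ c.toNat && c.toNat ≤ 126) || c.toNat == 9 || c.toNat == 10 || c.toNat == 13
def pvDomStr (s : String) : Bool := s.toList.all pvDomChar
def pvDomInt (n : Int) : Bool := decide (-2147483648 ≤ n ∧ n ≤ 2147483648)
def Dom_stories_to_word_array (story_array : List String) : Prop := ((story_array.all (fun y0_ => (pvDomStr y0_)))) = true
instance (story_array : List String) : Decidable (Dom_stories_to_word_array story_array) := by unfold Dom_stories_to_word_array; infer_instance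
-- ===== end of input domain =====

-- B replaces A's five replace passes + split per story by one character-scan with a word buffer (alternative decomposition, same cost); return value only, no mutation involved.
-- ===== PORT A =====
def stories_to_word_array (story_array : List String) : List String :=
  story_array.foldl (fun word_array story =>
    let story1 := PySem.Str.replace story "." " . "
    let story2 := PySem.Str.replace story1 "," " , "
    let story3 := PySem.Str.replace story2 "!" " ! "
    let story4 := PySem.Str.replace story3 "\"" " \" "
    let story5 := PySem.Str.replace story4 "'" " ' "
    let split_story := PySem.Str.split₀ story5
    split_story.foldl (fun acc word => acc ++ [word]) word_array) []

-- ===== PORT B =====  (single-pass scanner: flush word buffer on punctuation/whitespace)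
def pvIsPunct (c : Char) : Bool := c == '.' || c == ',' || c == '!' || c == '"' || c == '\''

def pvScan : List Char → List Char → List String → List String
  | [], buf, res => if buf.isEmpty then res else res ++ [String.ofList buf]
  | c :: rest, buf, res =>
    if pvIsPunct c then
      pvScan rest [] ((if buf.isEmpty then res else res ++ [String.ofList buf]) ++ [String.ofList [c]])
    else if PySem.Chars.isspace c then
      pvScan rest [] (if buf.isEmpty then res else res ++ [String.ofList buf])
    else
      pvScan rest (buf ++ [c]) res

def stories_to_word_array_alt (story_array : List String) : List String :=
  story_array.foldl (fun res story => pvScan story.toList [] res) []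

-- ===== PRECONDITION & SPEC =====
def Spec_stories_to_word_array (story_array : List String) (out : List String) : Prop := out = stories_to_word_array_alt story_array
instance (story_array : List String) (out : List String) : Decidable (Spec_stories_to_word_array story_array out) := by unfold Spec_stories_to_word_array; infer_instance

-- ===== CLAIM (what is proved, stated in full; the proofs are below) =====
def Claim_equal_stories_to_word_array : Prop := ∀ (story_array : List String), Dom_stories_to_word_array story_array → Spec_stories_to_word_array story_array (stories_to_word_array story_array)

-- ===== LEMMAS AND PROOFS =====

-- what one replace pass does to each original character
def pvSubst (c : Char) (new : List Char) (x : Char) : List Char := if x = c then new else [x]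

-- the combined effect of all five replace passes
def pvExpand (c : Char) : List Char := if pvIsPunct c then [' ', c, ' '] else [c]

lemma pvReplaceGo_one (c : Char) (new : List Char) :
    ∀ (fuel : Nat) (l acc : List Char), l.length ≤ fuel →
      PySem.Chars.replace.go [c] new fuel l acc = acc.reverse ++ l.flatMap (pvSubst c new) := by
  intro fuel
  induction fuel with
  | zero =>
    intro l acc h
    have : l = [] := List.eq_nil_of_length_eq_zero (Nat.le_zero.mp h)
    subst this
    simp [PySem.Chars.replace.go]
  | succ n ih =>
    intro l acc h
    cases l with
    | nil => simp [PySem.Chars.replace.go]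
    | cons x t =>
      by_cases hx : x = c
      · subst hx
        have hp : List.isPrefixOf [x] (x :: t) = true := by simp [List.isPrefixOf]
        rw [PySem.Chars.replace.go, if_pos hp]
        simp only [List.length_cons] at h
        rw [ih _ _ (by simpa using Nat.le_of_succ_le_succ h)]
        simp [pvSubst]
      · have hp : List.isPrefixOf [c] (x :: t) = false := by
          simp [List.isPrefixOf]; exact fun hc => absurd hc.symm hx
        rw [PySem.Chars.replace.go, if_neg (by simp [hp])]
        simp only [List.length_cons] at h
        rw [ih _ _ (Nat.le_of_succ_le_succ h)]
        simp [pvSubst, hx]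

lemma pvReplace_one (c : Char) (new l : List Char) :
    PySem.Chars.replace l [c] new = l.flatMap (pvSubst c new) := by
  rw [PySem.Chars.replace]
  simp only [List.isEmpty_cons, Bool.false_eq_true, if_false]
  exact pvReplaceGo_one c new l.length l [] (le_refl _)

-- the five chained passes act per original character as pvExpand
lemma pvChain (l : List Char) :
    PySem.Chars.replace (PySem.Chars.replace (PySem.Chars.replace (PySem.Chars.replace
      (PySem.Chars.replace l ['.'] [' ', '.', ' ']) [','] [' ', ',', ' '])
      ['!'] [' ', '!', ' ']) ['"'] [' ', '"', ' ']) ['\''] [' ', '\'', ' ']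
    = l.flatMap pvExpand := by
  simp only [pvReplace_one, List.flatMap_assoc]
  apply List.flatMap_congr
  intro x _
  by_cases h1 : x = '.'
  · subst h1; decide
  · by_cases h2 : x = ','
    · subst h2; decide
    · by_cases h3 : x = '!'
      · subst h3; decide
      · by_cases h4 : x = '"'
        · subst h4; decide
        · by_cases h5 : x = '\''
          · subst h5; decide
          · simp [pvSubst, pvExpand, pvIsPunct, h1, h2, h3, h4, h5]

-- split₀.go with the accumulator factored out
def pvSgo : List Char → List Char → List (List Char)
  | [], cur => if cur.isEmpty then [] else [cur.reverse]
  | c :: rest, cur =>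
    if PySem.Chars.isspace c then
      (if cur.isEmpty then pvSgo rest [] else cur.reverse :: pvSgo rest [])
    else pvSgo rest (c :: cur)

lemma pvSplitGo_spec : ∀ (cs cur : List Char) (acc : List (List Char)),
    PySem.Chars.split₀.go cs cur acc = acc.reverse ++ pvSgo cs cur := by
  intro cs
  induction cs with
  | nil =>
    intro cur acc
    by_cases h : cur.isEmpty <;> simp [PySem.Chars.split₀.go, pvSgo, h]
  | cons c rest ih =>
    intro cur acc
    by_cases hs : PySem.Chars.isspace c
    · by_cases h : cur.isEmpty
      · simp [PySem.Chars.split₀.go, pvSgo, hs, h, ih]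
      · simp [PySem.Chars.split₀.go, pvSgo, hs, h, ih]
    · simp [PySem.Chars.split₀.go, pvSgo, hs, ih]

lemma pvPunct_not_space (c : Char) (h : pvIsPunct c = true) : PySem.Chars.isspace c = false := by
  simp [pvIsPunct] at h
  rcases h with (((h | h) | h) | h) | h <;> subst h <;> decide

-- the scanner computes split₀ of the expanded story, appended to res
lemma pvScan_spec : ∀ (cs buf : List Char) (res : List String),
    pvScan cs buf res = res ++ (pvSgo (cs.flatMap pvExpand) buf.reverse).map String.ofList := by
  intro cs
  induction cs with
  | nil =>
    intro buf res
    cases buf with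
    | nil => simp [pvScan, pvSgo]
    | cons b bs => simp [pvScan, pvSgo]
  | cons c rest ih =>
    intro buf res
    by_cases hp : pvIsPunct c
    · have hsp : PySem.Chars.isspace (' ' : Char) = true := by decide
      have hcs : PySem.Chars.isspace c = false := pvPunct_not_space c hp
      rw [pvScan]
      simp only [hp, if_true, ih]
      have hexp : pvExpand c = [' ', c, ' '] := by simp [pvExpand, hp]
      simp only [List.flatMap_cons, hexp]
      cases buf with
      | nil => simp [pvSgo, hsp, hcs]
      | cons b bs => simp [pvSgo, hsp, hcs]
    · by_cases hs : PySem.Chars.isspace c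
      · rw [pvScan]
        simp only [hp, if_false, Bool.false_eq_true, hs, if_true, ih]
        have hexp : pvExpand c = [c] := by simp [pvExpand, hp]
        simp only [List.flatMap_cons, hexp]
        cases buf with
        | nil => simp [pvSgo, hs]
        | cons b bs => simp [pvSgo, hs]
      · rw [pvScan]
        simp only [hp, if_false, Bool.false_eq_true, hs, ih]
        have hexp : pvExpand c = [c] := by simp [pvExpand, hp]
        simp only [List.flatMap_cons, hexp]
        simp [pvSgo, hs]

-- per-story agreement of the two step functions
lemma pvStep_eq (res : List String) (story : String) :
    (PySem.Str.split₀ (PySem.Str.replace (PySem.Str.replace (PySem.Str.replace (PySem.Str.replace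
        (PySem.Str.replace story "." " . ") "," " , ") "!" " ! ") "\"" " \" ") "'" " ' ")).foldl
      (fun acc word => acc ++ [word]) res
    = pvScan story.toList [] res := by
  have h5 : (PySem.Str.replace (PySem.Str.replace (PySem.Str.replace (PySem.Str.replace
      (PySem.Str.replace story "." " . ") "," " , ") "!" " ! ") "\"" " \" ") "'" " ' ").toList
      = story.toList.flatMap pvExpand := by
    simp only [PySem.Str.toList_replace]
    exact pvChain story.toList
  rw [PySem.List.foldl_append_singleton]
  rw [pvScan_spec]
  rw [PySem.Str.split₀]
  rw [h5]
  rw [PySem.Chars.split₀]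
  rw [pvSplitGo_spec]
  simp

theorem pv_fold : ∀ (l : List String) (res : List String),
    l.foldl (fun word_array story =>
      (PySem.Str.split₀ (PySem.Str.replace (PySem.Str.replace (PySem.Str.replace (PySem.Str.replace
        (PySem.Str.replace story "." " . ") "," " , ") "!" " ! ") "\"" " \" ") "'" " ' ")).foldl
        (fun acc word => acc ++ [word]) word_array) res
    = l.foldl (fun res story => pvScan story.toList [] res) res := by
  intro l
  induction l with
  | nil => intro res; simp only [List.foldl_nil]
  | cons x xs ih =>
    intro res
    simp only [List.foldl_cons]
    rw [pvStep_eq res x]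
    exact ih _

-- ===== VERDICT (by name: the statement is the Claim_ definition above) =====
theorem stories_to_word_array_spec : Claim_equal_stories_to_word_array := by
  intro story_array _
  unfold Spec_stories_to_word_array
  exact pv_fold story_array []
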